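-- pv_equiv track=rewrite | github.com/PalomaSoaresR/matematica-discreta | matemática2/endorrelacao.py | verificar_relacao
-- ===== SOURCE A (Python) =====
-- def verificar_relacao(pares):
--     simetrico = True
--     antissimetrico = True
--     reflexivo = True
--     irreflexivo = True
--     transitivo = True
--
--     for par in pares:
--         x, y = par
--
--         #Simetria
--         if (y, x) not in pares:
--             simetrico = False
--
--         #Antissimetria
--         if x != y and (y, x) in pares:
--             antissimetrico = False
--
--         #Reflexivo
--         if (x, x) not in pares:
--             reflexivo = False
--
--         #Irreflexivo
--         if (x, x) in pares:
--             irreflexivo = False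
--
--     #Transitividade
--     for par1 in pares:
--         x, y = par1
--         for par2 in pares:
--             if y == par2[0] and (x, par2[1]) not in pares:
--                 transitivo = False
--
--     return simetrico, antissimetrico, reflexivo, irreflexivo, transitivo
-- ===== SOURCE B (Python) =====
-- def verificar_relacao(pares):
--     ps = set(pares)
--     simetrico = all((y, x) in ps for (x, y) in pares)
--     antissimetrico = all(x == y or (y, x) not in ps for (x, y) in pares)
--     reflexivo = all((x, x) in ps for (x, y) in pares)
--     irreflexivo = all((x, x) not in ps for (x, y) in pares)
--     sucessores = {}
--     for (x, y) in pares: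
--         sucessores[x] = sucessores.get(x, []) + [y]
--     transitivo = all((x, z) in ps
--                      for (x, y) in pares
--                      for z in sucessores.get(y, []))
--     return simetrico, antissimetrico, reflexivo, irreflexivo, transitivo
-- ===== Notes on version B (the rewrite author's own statement) =====
-- stated objective: faster
-- what changed: Replaces flag-mutating loops with all(...) over a precomputed set of the pairs (O(1) membership) and a successor dictionary that replaces the inner scan of the transitivity check.
import Mathlib
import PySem

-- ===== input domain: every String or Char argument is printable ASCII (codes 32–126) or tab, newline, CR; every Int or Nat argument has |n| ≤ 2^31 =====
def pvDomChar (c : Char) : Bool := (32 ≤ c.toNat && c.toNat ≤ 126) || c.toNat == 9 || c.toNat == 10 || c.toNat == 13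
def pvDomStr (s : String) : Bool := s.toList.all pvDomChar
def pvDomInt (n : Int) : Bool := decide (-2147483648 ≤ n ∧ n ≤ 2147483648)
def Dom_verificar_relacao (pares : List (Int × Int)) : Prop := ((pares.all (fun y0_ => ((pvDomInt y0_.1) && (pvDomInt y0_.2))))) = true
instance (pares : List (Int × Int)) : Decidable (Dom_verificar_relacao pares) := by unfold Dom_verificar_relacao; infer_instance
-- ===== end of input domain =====

-- B replaces A's flag-mutating O(n^3) loops with all(...) over a set of the pairs and a
-- successor dictionary for the transitivity check (objective: faster, asymptotic).

-- ===== PORT A =====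
def verificar_relacao (pares : List (Int × Int)) : Bool × Bool × Bool × Bool × Bool :=
  -- first loop: the four flags, updated in the order of A's ifs
  let quad := pares.foldl (fun st par =>
    let x := par.1
    let y := par.2
    let simetrico := if !pares.contains (y, x) then false else st.1
    let antissimetrico := if x ≠ y && pares.contains (y, x) then false else st.2.1
    let reflexivo := if !pares.contains (x, x) then false else st.2.2.1
    let irreflexivo := if pares.contains (x, x) then false else st.2.2.2
    (simetrico, antissimetrico, reflexivo, irreflexivo)) (true, true, true, true)
  -- second (nested) loop: transitivity
  let transitivo := pares.foldl (fun t par1 =>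
    pares.foldl (fun t par2 =>
      if par1.2 == par2.1 && !pares.contains (par1.1, par2.2) then false else t) t) true
  (quad.1, quad.2.1, quad.2.2.1, quad.2.2.2, transitivo)

-- ===== PORT B =====
def verificar_relacao_alt (pares : List (Int × Int)) : Bool × Bool × Bool × Bool × Bool :=
  let ps : PySem.Set (Int × Int) := PySem.Set.ofList pares
  let simetrico := pares.all (fun p => ps.contains (p.2, p.1))
  let antissimetrico := pares.all (fun p => p.1 == p.2 || !ps.contains (p.2, p.1))
  let reflexivo := pares.all (fun p => ps.contains (p.1, p.1))
  let irreflexivo := pares.all (fun p => !ps.contains (p.1, p.1))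
  let sucessores := pares.foldl (fun d p => d.modify p.1 [] (· ++ [p.2])) PySem.Dict.empty
  let transitivo := pares.all (fun p => (sucessores.getD p.2 []).all (fun z => ps.contains (p.1, z)))
  (simetrico, antissimetrico, reflexivo, irreflexivo, transitivo)

-- ===== PRECONDITION & SPEC =====
def Spec_verificar_relacao (pares : List (Int × Int)) (out : Bool × Bool × Bool × Bool × Bool) : Prop := out = verificar_relacao_alt pares
instance (pares : List (Int × Int)) (out : Bool × Bool × Bool × Bool × Bool) : Decidable (Spec_verificar_relacao pares out) := by unfold Spec_verificar_relacao; infer_instance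

-- ===== CLAIM (what is proved, stated in full; the proofs are below) =====
def Claim_equal_verificar_relacao : Prop := ∀ (pares : List (Int × Int)), Dom_verificar_relacao pares → Spec_verificar_relacao pares (verificar_relacao pares)

-- ===== LEMMAS AND PROOFS =====

-- a set-membership test on set(pares) is a membership test on pares
theorem contains_ofList {α : Type} [BEq α] [LawfulBEq α] (xs : List α) (a : α) :
    (PySem.Set.ofList xs).contains a = xs.contains a := by
  simp [PySem.Set.contains_eq_listContains, PySem.Set.mem_ofList]

-- a "set the flag to false on violation" loop is an all(no violation) conjoined to the start
theorem foldl_flag {α : Type} (xs : List α) (c : α → Bool) (b : Bool) :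
    xs.foldl (fun t a => if c a then false else t) b = (b && xs.all (fun a => !c a)) := by
  induction xs generalizing b with
  | nil => simp
  | cons x xs ih =>
    simp only [List.foldl_cons, List.all_cons, ih]
    cases h : c x <;> simp

-- a "t := t && f p" loop from true is all
theorem foldl_and {α : Type} (xs : List α) (f : α → Bool) (b : Bool) :
    xs.foldl (fun t a => t && f a) b = (b && xs.all f) := by
  induction xs generalizing b with
  | nil => simp
  | cons x xs ih => simp [List.foldl_cons, ih, Bool.and_assoc]

-- A's first loop computes the four all-style flags
theorem quad_fold (pares xs : List (Int × Int)) (s a r i : Bool) :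
    xs.foldl (fun st (par : Int × Int) =>
      let x := par.1
      let y := par.2
      let simetrico := if !pares.contains (y, x) then false else st.1
      let antissimetrico := if x ≠ y && pares.contains (y, x) then false else st.2.1
      let reflexivo := if !pares.contains (x, x) then false else st.2.2.1
      let irreflexivo := if pares.contains (x, x) then false else st.2.2.2
      (simetrico, antissimetrico, reflexivo, irreflexivo)) (s, a, r, i)
    = (s && xs.all (fun p => pares.contains (p.2, p.1)),
       a && xs.all (fun p => !(p.1 ≠ p.2 && pares.contains (p.2, p.1))),
       r && xs.all (fun p => pares.contains (p.1, p.1)),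
       i && xs.all (fun p => !pares.contains (p.1, p.1))) := by
  induction xs generalizing s a r i with
  | nil => simp
  | cons x xs ih =>
    simp only [List.foldl_cons, List.all_cons, ih]
    refine Prod.ext ?_ (Prod.ext ?_ (Prod.ext ?_ ?_)) <;>
      · simp only []
        cases h1 : pares.contains (x.2, x.1) <;> cases h2 : pares.contains (x.1, x.1) <;>
          by_cases h3 : x.1 = x.2 <;> simp [h3]

theorem verificar_relacao_spec : Claim_equal_verificar_relacao := by
  intro pares _
  show verificar_relacao pares = verificar_relacao_alt pares
  simp only [verificar_relacao, verificar_relacao_alt, quad_fold, Bool.true_and]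
  refine Prod.ext ?_ (Prod.ext ?_ (Prod.ext ?_ (Prod.ext ?_ ?_)))
  · simp
  · simp only [contains_ofList]
    refine congrArg _ (funext fun p => ?_)
    by_cases h : p.1 = p.2 <;> simp [h]
  · simp
  · simp
  · -- transitivity
    simp only [foldl_flag, foldl_and, Bool.true_and]
    refine congrArg _ (funext fun p => ?_)
    rw [PySem.Dict.getD_foldl_modify_append]
    simp only [PySem.Dict.getD_empty, List.nil_append, List.all_map, List.all_filter,
      Function.comp, contains_ofList]
    refine congrArg _ (funext fun q => ?_)
    cases h : (p.2 == q.1) <;> simp_all [BEq.comm]
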